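-- pv_equiv track=rewrite | github.com/hberg-sandbox/hts-survey-explorer | app_backup2.py | extract_demographic_groups
-- ===== SOURCE A (Python) =====
-- from typing import Dict, List, Tuple, Optional
--
-- def extract_demographic_groups(question: Dict) -> Dict[str, List[str]]:
--     """Extract demographic groups and their segments from a question."""
--     groups = {"All Respondents": ["Total"]}
--
--     for col_idx, group_name in question["category_groups"].items():
--         if col_idx != "1":  # Skip Total column
--             label = question["columns"][col_idx]
--             if group_name not in groups:
--                 groups[group_name] = []
--             if label not in groups[group_name]:
--                 groups[group_name].append(label)
--
--     return groups
-- ===== SOURCE B (Python) =====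
-- def extract_demographic_groups(question):
--     """Extract demographic groups and their segments from a question.
--
--     Flat rewrite: flatten the question into a list of (group, label) pairs
--     (seeded with the All Respondents/Total pair), take the distinct group
--     names in first-occurrence order, and build each group's segment list
--     by a per-group filtered scan with order-preserving dedup.  No dict of
--     lists is accumulated incrementally at all."""
--     pairs = [("All Respondents", "Total")]
--     pairs += [(g, question["columns"][i])
--               for i, g in question["category_groups"].items() if i != "1"]
--     names = list(dict.fromkeys(g for g, _ in pairs))
--     return {g: list(dict.fromkeys(l for gg, l in pairs if gg == g)) for g in names}
-- ===== Notes on version B (the rewrite author's own statement) =====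
-- stated objective: alternative
-- what changed: B never accumulates a dict of lists: it flattens the question into a flat (group,label) pair list seeded with (All Respondents, Total), extracts the distinct group names in first-occurrence order, and builds each group's segments by a per-group filtered scan with order-preserving dedup, instead of A's single pass that grows dict entries with an inline membership test.
import Mathlib
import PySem

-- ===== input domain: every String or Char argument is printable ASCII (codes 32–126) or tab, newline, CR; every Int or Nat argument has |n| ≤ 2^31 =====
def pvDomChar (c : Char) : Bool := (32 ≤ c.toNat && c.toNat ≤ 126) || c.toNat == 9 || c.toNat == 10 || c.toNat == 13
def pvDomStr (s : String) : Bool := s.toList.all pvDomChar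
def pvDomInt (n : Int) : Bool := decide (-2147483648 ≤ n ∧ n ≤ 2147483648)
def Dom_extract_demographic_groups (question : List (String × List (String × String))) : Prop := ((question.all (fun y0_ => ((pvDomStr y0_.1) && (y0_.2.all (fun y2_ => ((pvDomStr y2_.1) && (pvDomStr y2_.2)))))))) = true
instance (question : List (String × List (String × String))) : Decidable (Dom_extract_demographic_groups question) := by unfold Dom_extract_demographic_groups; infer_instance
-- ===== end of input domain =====

-- B flattens the question into a (group, label) pair list, takes the distinct group
-- names, and builds each group by a per-group filtered scan with dedup; A instead
-- accumulates a dict of lists in one pass with an inline membership test.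

-- ===== PORT A =====
-- literal port of A: groups = {"All Respondents": ["Total"]}; for col_idx, group_name in
-- question["category_groups"].items(): skip "1", label = question["columns"][col_idx],
-- create groups[group_name] if absent, append label if not already present.
-- (Pre_ guarantees every dict lookup succeeds; getD's default is never reached inside Pre_.)
def extract_demographic_groups (question : List (String × List (String × String))) : List (String × List String) :=
  let q := PySem.Dict.ofList question
  let cg := PySem.Dict.ofList (q.getD "category_groups" [])
  let cols := PySem.Dict.ofList (q.getD "columns" [])
  (cg.items.foldl (fun (g : PySem.Dict String (List String)) p =>
      if p.1 ≠ "1" then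
        let label := cols.getD p.1 ""
        let g1 := if g.contains p.2 then g else g.insert p.2 ([] : List String)
        if label ∈ g1.getD p.2 [] then g1 else g1.modify p.2 [] (· ++ [label])
      else g)
    (PySem.Dict.ofList [("All Respondents", ["Total"])])).items

-- ===== PORT B =====
-- literal port of B: pairs = seed :: [(group, columns[idx]) for idx, group in cg.items() if idx != "1"];
-- names = ordered dedup of the group components; result = one filtered scan per name, deduped.
def extract_demographic_groups_alt (question : List (String × List (String × String))) : List (String × List String) :=
  let q := PySem.Dict.ofList question
  let cg := PySem.Dict.ofList (q.getD "category_groups" [])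
  let cols := PySem.Dict.ofList (q.getD "columns" [])
  let pairs := ("All Respondents", "Total") ::
      (cg.items.filter (fun p => decide (p.1 ≠ "1"))).map (fun p => (p.2, cols.getD p.1 ""))
  let names := PySem.List.dedup (pairs.map Prod.fst)
  names.map (fun g => (g, PySem.List.dedup ((pairs.filter (fun pr => pr.1 == g)).map Prod.snd)))

-- ===== PRECONDITION & SPEC =====
-- Pre_ excludes exactly the inputs where Python A raises KeyError: a missing
-- "category_groups" key, or a non-"1" category-group column index present while
-- "columns" is missing or does not contain that index.
def Pre_extract_demographic_groups (question : List (String × List (String × String))) : Prop :=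
  let q := PySem.Dict.ofList question
  q.contains "category_groups" = true ∧
    ∀ p ∈ (PySem.Dict.ofList (q.getD "category_groups" [])).items,
      p.1 ≠ "1" →
        (q.contains "columns" = true ∧
          (PySem.Dict.ofList (q.getD "columns" [])).contains p.1 = true)
instance (question : List (String × List (String × String))) : Decidable (Pre_extract_demographic_groups question) := by unfold Pre_extract_demographic_groups; infer_instance

def pvWitness_extract_demographic_groups : (List (String × List (String × String))) :=
  [("category_groups", [("1", "All Respondents"), ("2", "Gender"), ("3", "Gender")]),
   ("columns", [("1", "Total"), ("2", "Male"), ("3", "Female")])]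

def Spec_extract_demographic_groups (question : List (String × List (String × String))) (out : List (String × List String)) : Prop := out = extract_demographic_groups_alt question
instance (question : List (String × List (String × String))) (out : List (String × List String)) : Decidable (Spec_extract_demographic_groups question out) := by unfold Spec_extract_demographic_groups; infer_instance

-- ===== CLAIM (what is proved, stated in full; the proofs are below) =====
def Claim_equal_extract_demographic_groups : Prop := ∀ (question : List (String × List (String × String))), Dom_extract_demographic_groups question → Pre_extract_demographic_groups question → Spec_extract_demographic_groups question (extract_demographic_groups question)

-- ===== LEMMAS AND PROOFS =====

-- A's loop body applied to an already "cooked" (group, label) pair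
def pvStepA (g : PySem.Dict String (List String)) (p : String × String) : PySem.Dict String (List String) :=
  let g1 := if g.contains p.1 then g else g.insert p.1 ([] : List String)
  if p.2 ∈ g1.getD p.1 [] then g1 else g1.modify p.1 [] (· ++ [p.2])

-- A's fold over cg.items equals the fold of pvStepA over the cooked pair list
theorem pvFoldA_cooked (cols : PySem.Dict String String) (l : List (String × String)) :
    ∀ (d : PySem.Dict String (List String)),
    l.foldl (fun (g : PySem.Dict String (List String)) p =>
        if p.1 ≠ "1" then
          let label := cols.getD p.1 ""
          let g1 := if g.contains p.2 then g else g.insert p.2 ([] : List String)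
          if label ∈ g1.getD p.2 [] then g1 else g1.modify p.2 [] (· ++ [label])
        else g) d
      = ((l.filter (fun p => decide (p.1 ≠ "1"))).map (fun p => (p.2, cols.getD p.1 ""))).foldl pvStepA d := by
  induction l with
  | nil => intro d; rfl
  | cons hd tl ih =>
    intro d
    by_cases h1 : hd.1 = "1"
    · simp only [List.foldl_cons, List.filter_cons, h1, ne_eq, not_true_eq_false, decide_false,
        Bool.false_eq_true, if_false]
      simpa [h1] using ih d
    · simp only [List.foldl_cons, List.filter_cons, ne_eq, h1, not_false_iff, decide_true,
        if_true, List.map_cons]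
      rw [ih]
      rfl

theorem pvStepA_keys (d : PySem.Dict String (List String)) (p : String × String) :
    (pvStepA d p).keys = PySem.Set.add d.keys p.1 := by
  unfold pvStepA
  by_cases hc : d.contains p.1 = true
  · have hm : p.1 ∈ d.keys := (PySem.Dict.contains_iff_mem_keys d p.1).mp hc
    rw [PySem.Set.add_of_mem hm]
    simp only [hc, if_true]
    split
    · rfl
    · rw [PySem.Dict.keys_modify, PySem.Dict.keys_insert_of_contains d _ hc]
  · have hcf : d.contains p.1 = false := by simpa using hc
    have hm : p.1 ∉ d.keys := fun h => hc ((PySem.Dict.contains_iff_mem_keys d p.1).mpr h)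
    rw [PySem.Set.add_of_not_mem hm]
    simp only [hcf, Bool.false_eq_true, if_false, PySem.Dict.getD_insert_self,
      List.not_mem_nil, PySem.Dict.keys_modify]
    rw [PySem.Dict.keys_insert_of_contains _ _ (PySem.Dict.contains_insert_self d p.1 []),
      PySem.Dict.keys_insert_of_not_contains d _ hcf]

theorem pvStepA_getD (d : PySem.Dict String (List String)) (p : String × String) (c : String) :
    (pvStepA d p).getD c [] = if p.1 = c then PySem.Set.add (d.getD c []) p.2 else d.getD c [] := by
  unfold pvStepA
  by_cases hpc : p.1 = c
  · subst hpc
    rw [if_pos rfl]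
    by_cases hc : d.contains p.1 = true
    · simp only [hc, if_true]
      by_cases hm : p.2 ∈ d.getD p.1 []
      · rw [if_pos hm, PySem.Set.add_of_mem hm]
      · rw [if_neg hm, PySem.Set.add_of_not_mem hm, PySem.Dict.getD_modify_self]
    · have hcf : d.contains p.1 = false := by simpa using hc
      simp only [hcf, Bool.false_eq_true, if_false, PySem.Dict.getD_insert_self,
        List.not_mem_nil]
      rw [PySem.Dict.getD_modify_self, PySem.Dict.getD_insert_self,
        PySem.Dict.getD_of_not_contains d _ hcf]
      rw [PySem.Set.add_of_not_mem (List.not_mem_nil)]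
  · rw [if_neg hpc]
    have hcp : c ≠ p.1 := fun h => hpc h.symm
    by_cases hc : d.contains p.1 = true
    · simp only [hc, if_true]
      split
      · rfl
      · exact PySem.Dict.getD_modify_of_ne d _ _ hcp
    · have hcf : d.contains p.1 = false := by simpa using hc
      simp only [hcf, Bool.false_eq_true, if_false, PySem.Dict.getD_insert_self,
        List.not_mem_nil]
      rw [PySem.Dict.getD_modify_of_ne _ _ _ hcp, PySem.Dict.getD_insert, if_neg hcp]

theorem pvFoldA_keys (l : List (String × String)) :
    ∀ (d : PySem.Dict String (List String)),
    (l.foldl pvStepA d).keys = PySem.Set.update d.keys (l.map Prod.fst) := by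
  induction l with
  | nil => intro d; rfl
  | cons hd tl ih =>
    intro d
    rw [List.foldl_cons, ih, pvStepA_keys, List.map_cons, PySem.Set.update_cons]

theorem pvFoldA_getD (l : List (String × String)) :
    ∀ (d : PySem.Dict String (List String)) (c : String),
    (l.foldl pvStepA d).getD c []
      = PySem.Set.update (d.getD c []) ((l.filter (fun p => p.1 == c)).map Prod.snd) := by
  induction l with
  | nil => intro d c; rfl
  | cons hd tl ih =>
    intro d c
    rw [List.foldl_cons, ih, pvStepA_getD]
    by_cases hpc : hd.1 = c
    · rw [if_pos hpc, List.filter_cons, if_pos (by simpa using hpc), List.map_cons,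
        PySem.Set.update_cons]
    · rw [if_neg hpc, List.filter_cons, if_neg (by simpa using hpc)]

-- the whole program, for an arbitrary category_groups item list and columns dict
theorem pvKey (cols : PySem.Dict String String) (l : List (String × String)) :
    (l.foldl (fun (g : PySem.Dict String (List String)) p =>
        if p.1 ≠ "1" then
          let label := cols.getD p.1 ""
          let g1 := if g.contains p.2 then g else g.insert p.2 ([] : List String)
          if label ∈ g1.getD p.2 [] then g1 else g1.modify p.2 [] (· ++ [label])
        else g)
      (PySem.Dict.ofList [("All Respondents", ["Total"])])).items
    = (PySem.List.dedup ((("All Respondents", "Total") ::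
          (l.filter (fun p => decide (p.1 ≠ "1"))).map (fun p => (p.2, cols.getD p.1 ""))).map Prod.fst)).map
        (fun g => (g, PySem.List.dedup (((("All Respondents", "Total") ::
          (l.filter (fun p => decide (p.1 ≠ "1"))).map (fun p => (p.2, cols.getD p.1 ""))).filter
            (fun pr => pr.1 == g)).map Prod.snd))) := by
  rw [pvFoldA_cooked cols l]
  set d0 : PySem.Dict String (List String) := PySem.Dict.ofList [("All Respondents", ["Total"])] with hd0
  set cooked := (l.filter (fun p => decide (p.1 ≠ "1"))).map (fun p => (p.2, cols.getD p.1 "")) with hcooked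
  have hnd0 : d0.keys.Nodup := by decide
  have hndk : (cooked.foldl pvStepA d0).keys.Nodup := by
    rw [pvFoldA_keys]
    exact PySem.Set.nodup_update _ _ hnd0
  rw [PySem.Dict.items_eq_map_keys _ hndk [], pvFoldA_keys]
  have hkeys : PySem.Set.update d0.keys (cooked.map Prod.fst)
      = PySem.List.dedup ((("All Respondents", "Total") :: cooked).map Prod.fst) := by
    rw [PySem.List.dedup_eq_ofList, List.map_cons]
    rfl
  rw [hkeys]
  apply List.map_congr_left
  intro g _
  refine Prod.ext rfl ?_
  show (cooked.foldl pvStepA d0).getD g []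
      = PySem.List.dedup (((("All Respondents", "Total") :: cooked).filter (fun pr => pr.1 == g)).map Prod.snd)
  rw [pvFoldA_getD, List.filter_cons]
  by_cases hg : g = "All Respondents"
  · subst hg
    rw [if_pos (by simp), List.map_cons, PySem.List.dedup_eq_ofList]
    have hv : d0.getD "All Respondents" [] = ["Total"] := by decide
    rw [hv]
    rfl
  · rw [if_neg (by simpa using fun h : ("All Respondents" : String) = g => hg h.symm)]
    have hv : d0.getD g [] = [] := by
      rw [show d0 = PySem.Dict.empty.insert "All Respondents" ["Total"] from rfl,
        PySem.Dict.getD_insert, if_neg hg]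
      exact PySem.Dict.getD_empty _ _
    rw [hv, PySem.List.dedup_eq_ofList, PySem.Set.update_nil_left]

-- ===== VERDICT (by name: the statement is the Claim_ definition above) =====
theorem extract_demographic_groups_spec : Claim_equal_extract_demographic_groups := by
  intro question _ _
  unfold Spec_extract_demographic_groups extract_demographic_groups extract_demographic_groups_alt
  exact pvKey _ _
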